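-- pv_equiv track=rewrite | github.com/PreludeAndFugue/AdventOfCode | 2022/python/day18.py | is_hole_2
-- ===== SOURCE A (Python) =====
-- def is_hole_2(c, cubes, xmin, xmax, ymin, ymax, zmin, zmax):
--     cx, cy, cz = c
--
--     for x in range(xmax - cx + 2):
--         l = cx + x, cy, cz
--         if l in cubes:
--             break
--     else:
--         return False
--
--     for x in range(cx - xmin + 2):
--         l = cx - x, cy, cz
--         if l in cubes:
--             break
--     else:
--         return False
--
--     for y in range(ymax - cy + 2):
--         l = cx, cy + y, cz
--         if l in cubes:
--             break
--     else:
--         return False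
--
--     for y in range(cy - ymin + 2):
--         l = cx, cy - y, cz
--         if l in cubes:
--             break
--     else:
--         return False
--
--     for z in range(zmax - cz + 2):
--         l = cx, cy, cz + z
--         if l in cubes:
--             break
--     else:
--         return False
--
--     for z in range(cz - zmin + 2):
--         l = cx, cy, cz - z
--         if l in cubes:
--             break
--     else:
--         return False
--
--     return True
-- ===== SOURCE B (Python) =====
-- def is_hole_2(c, cubes, xmin, xmax, ymin, ymax, zmin, zmax):
--     cx, cy, cz = c
--     posx = negx = posy = negy = posz = negz = False
--     for (x, y, z) in cubes:
--         if y == cy and z == cz: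
--             if cx <= x <= xmax + 1:
--                 posx = True
--             if xmin - 1 <= x <= cx:
--                 negx = True
--         if x == cx and z == cz:
--             if cy <= y <= ymax + 1:
--                 posy = True
--             if ymin - 1 <= y <= cy:
--                 negy = True
--         if x == cx and y == cy:
--             if cz <= z <= zmax + 1:
--                 posz = True
--             if zmin - 1 <= z <= cz:
--                 negz = True
--     return posx and negx and posy and negy and posz and negz
-- ===== Notes on version B (the rewrite author's own statement) =====
-- stated objective: alternative
-- what changed: Replaces six ray scans over coordinate ranges (each a membership test per grid cell out to the bound) with a single pass over the cube list that accumulates six directional flags via bounded coordinate comparisons; cost becomes O(|cubes|) independent of the grid extents, though a timing run could not measure a speedup.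
import Mathlib
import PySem

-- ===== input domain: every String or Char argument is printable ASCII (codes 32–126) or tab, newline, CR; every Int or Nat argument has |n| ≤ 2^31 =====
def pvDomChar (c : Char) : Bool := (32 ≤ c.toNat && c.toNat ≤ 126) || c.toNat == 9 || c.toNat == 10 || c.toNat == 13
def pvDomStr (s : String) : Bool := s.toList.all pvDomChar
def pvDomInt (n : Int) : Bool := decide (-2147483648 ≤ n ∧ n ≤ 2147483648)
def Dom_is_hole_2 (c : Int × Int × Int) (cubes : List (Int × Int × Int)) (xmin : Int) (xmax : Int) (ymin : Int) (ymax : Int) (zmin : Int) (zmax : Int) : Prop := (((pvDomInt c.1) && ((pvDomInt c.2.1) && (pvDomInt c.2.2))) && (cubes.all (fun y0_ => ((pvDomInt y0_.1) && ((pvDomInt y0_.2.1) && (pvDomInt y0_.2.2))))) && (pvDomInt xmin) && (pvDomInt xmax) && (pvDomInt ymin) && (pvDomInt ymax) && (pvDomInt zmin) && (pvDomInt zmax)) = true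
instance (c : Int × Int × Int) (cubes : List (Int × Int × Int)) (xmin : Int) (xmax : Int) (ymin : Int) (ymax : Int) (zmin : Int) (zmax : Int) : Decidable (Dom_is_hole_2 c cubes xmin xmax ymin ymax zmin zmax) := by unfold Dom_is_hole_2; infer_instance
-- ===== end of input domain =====

-- ===== PORT A =====
-- A: six directed ray scans from c out to one past each grid bound; each loop's
-- for/else becomes List.any over the same pyRange (break on first hit = any).
def is_hole_2 (c : Int × Int × Int) (cubes : List (Int × Int × Int)) (xmin : Int) (xmax : Int) (ymin : Int) (ymax : Int) (zmin : Int) (zmax : Int) : Bool :=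
  let cx := c.1; let cy := c.2.1; let cz := c.2.2
  if (PySem.List.pyRange 0 (xmax - cx + 2) 1).any (fun x => cubes.contains (cx + x, cy, cz)) then
    if (PySem.List.pyRange 0 (cx - xmin + 2) 1).any (fun x => cubes.contains (cx - x, cy, cz)) then
      if (PySem.List.pyRange 0 (ymax - cy + 2) 1).any (fun y => cubes.contains (cx, cy + y, cz)) then
        if (PySem.List.pyRange 0 (cy - ymin + 2) 1).any (fun y => cubes.contains (cx, cy - y, cz)) then
          if (PySem.List.pyRange 0 (zmax - cz + 2) 1).any (fun z => cubes.contains (cx, cy, cz + z)) then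
            if (PySem.List.pyRange 0 (cz - zmin + 2) 1).any (fun z => cubes.contains (cx, cy, cz - z)) then
              true
            else false
          else false
        else false
      else false
    else false
  else false

-- ===== PORT B =====
-- B: one traversal of cubes accumulating six directional flags (bounded coordinate comparisons)
-- instead of A's six per-cell ray scans; a different traversal of the same data.
def altStep (cx cy cz xmin xmax ymin ymax zmin zmax : Int)
    (s : Bool × Bool × Bool × Bool × Bool × Bool) (q : Int × Int × Int) :
    Bool × Bool × Bool × Bool × Bool × Bool :=
  let x := q.1; let y := q.2.1; let z := q.2.2
  (s.1 || (decide (y = cy) && decide (z = cz) && decide (cx ≤ x) && decide (x ≤ xmax + 1)),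
   s.2.1 || (decide (y = cy) && decide (z = cz) && decide (xmin - 1 ≤ x) && decide (x ≤ cx)),
   s.2.2.1 || (decide (x = cx) && decide (z = cz) && decide (cy ≤ y) && decide (y ≤ ymax + 1)),
   s.2.2.2.1 || (decide (x = cx) && decide (z = cz) && decide (ymin - 1 ≤ y) && decide (y ≤ cy)),
   s.2.2.2.2.1 || (decide (x = cx) && decide (y = cy) && decide (cz ≤ z) && decide (z ≤ zmax + 1)),
   s.2.2.2.2.2 || (decide (x = cx) && decide (y = cy) && decide (zmin - 1 ≤ z) && decide (z ≤ cz)))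

def is_hole_2_alt (c : Int × Int × Int) (cubes : List (Int × Int × Int)) (xmin : Int) (xmax : Int) (ymin : Int) (ymax : Int) (zmin : Int) (zmax : Int) : Bool :=
  let cx := c.1; let cy := c.2.1; let cz := c.2.2
  let s := cubes.foldl (altStep cx cy cz xmin xmax ymin ymax zmin zmax)
      (false, false, false, false, false, false)
  s.1 && s.2.1 && s.2.2.1 && s.2.2.2.1 && s.2.2.2.2.1 && s.2.2.2.2.2

-- ===== PRECONDITION & SPEC =====
def Spec_is_hole_2 (c : Int × Int × Int) (cubes : List (Int × Int × Int)) (xmin : Int) (xmax : Int) (ymin : Int) (ymax : Int) (zmin : Int) (zmax : Int) (out : Bool) : Prop := out = is_hole_2_alt c cubes xmin xmax ymin ymax zmin zmax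
instance (c : Int × Int × Int) (cubes : List (Int × Int × Int)) (xmin : Int) (xmax : Int) (ymin : Int) (ymax : Int) (zmin : Int) (zmax : Int) (out : Bool) : Decidable (Spec_is_hole_2 c cubes xmin xmax ymin ymax zmin zmax out) := by unfold Spec_is_hole_2; infer_instance

-- ===== CLAIM (what is proved, stated in full; the proofs are below) =====
def Claim_equal_is_hole_2 : Prop := ∀ (c : Int × Int × Int) (cubes : List (Int × Int × Int)) (xmin : Int) (xmax : Int) (ymin : Int) (ymax : Int) (zmin : Int) (zmax : Int), Dom_is_hole_2 c cubes xmin xmax ymin ymax zmin zmax → Spec_is_hole_2 c cubes xmin xmax ymin ymax zmin zmax (is_hole_2 c cubes xmin xmax ymin ymax zmin zmax)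

-- ===== LEMMAS AND PROOFS =====

-- B's fold computes, componentwise, "init || cubes.any (that flag's predicate)".
theorem foldl_altStep (cx cy cz xmin xmax ymin ymax zmin zmax : Int)
    (cubes : List (Int × Int × Int)) (s : Bool × Bool × Bool × Bool × Bool × Bool) :
    cubes.foldl (altStep cx cy cz xmin xmax ymin ymax zmin zmax) s =
      (s.1 || cubes.any (fun q => decide (q.2.1 = cy) && decide (q.2.2 = cz) && decide (cx ≤ q.1) && decide (q.1 ≤ xmax + 1)),
       s.2.1 || cubes.any (fun q => decide (q.2.1 = cy) && decide (q.2.2 = cz) && decide (xmin - 1 ≤ q.1) && decide (q.1 ≤ cx)),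
       s.2.2.1 || cubes.any (fun q => decide (q.1 = cx) && decide (q.2.2 = cz) && decide (cy ≤ q.2.1) && decide (q.2.1 ≤ ymax + 1)),
       s.2.2.2.1 || cubes.any (fun q => decide (q.1 = cx) && decide (q.2.2 = cz) && decide (ymin - 1 ≤ q.2.1) && decide (q.2.1 ≤ cy)),
       s.2.2.2.2.1 || cubes.any (fun q => decide (q.1 = cx) && decide (q.2.1 = cy) && decide (cz ≤ q.2.2) && decide (q.2.2 ≤ zmax + 1)),
       s.2.2.2.2.2 || cubes.any (fun q => decide (q.1 = cx) && decide (q.2.1 = cy) && decide (zmin - 1 ≤ q.2.2) && decide (q.2.2 ≤ cz))) := by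
  induction cubes generalizing s with
  | nil => simp
  | cons q rest ih =>
    simp only [List.foldl_cons, List.any_cons, ih, altStep]
    simp [Bool.or_assoc]

-- A ray scan "some point g i, i in [a,b), lies in cubes" equals a filtered scan of cubes,
-- whenever P characterises the image of [a,b) under g.
theorem any_ray {α : Type} [BEq α] [LawfulBEq α] (xs : List α) (g : Int → α) (P : α → Bool) (a b : Int)
    (h : ∀ q : α, P q = true ↔ ∃ i, a ≤ i ∧ i < b ∧ q = g i) :
    (PySem.List.pyRange a b 1).any (fun i => xs.contains (g i)) = xs.any P := by
  rw [Bool.eq_iff_iff]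
  simp only [List.any_eq_true, PySem.List.mem_pyRange_one, List.contains_iff_mem, h]
  constructor
  · rintro ⟨i, ⟨hi1, hi2⟩, hmem⟩
    exact ⟨g i, hmem, i, hi1, hi2, rfl⟩
  · rintro ⟨q, hq, i, hi1, hi2, rfl⟩
    exact ⟨i, ⟨hi1, hi2⟩, hq⟩


theorem leg1 (cubes : List (Int × Int × Int)) (cx cy cz xmax : Int) :
    (PySem.List.pyRange 0 (xmax - cx + 2) 1).any (fun i => cubes.contains (cx + i, cy, cz)) = cubes.any (fun q => decide (q.2.1 = cy) && decide (q.2.2 = cz) && decide (cx ≤ q.1) && decide (q.1 ≤ xmax + 1)) := by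
  apply any_ray cubes (fun i => (cx + i, cy, cz))
  rintro ⟨x, y, z⟩
  simp only [Bool.and_eq_true, decide_eq_true_eq, Prod.mk.injEq, and_assoc]
  constructor
  · rintro ⟨h1, h2, h3, h4⟩
    exact ⟨x - cx, by omega, by omega, by omega, h1, h2⟩
  · rintro ⟨i, h1, h2, h3, h4, h5⟩
    exact ⟨h4, h5, by omega, by omega⟩

theorem leg2 (cubes : List (Int × Int × Int)) (cx cy cz xmin : Int) :
    (PySem.List.pyRange 0 (cx - xmin + 2) 1).any (fun i => cubes.contains (cx - i, cy, cz)) = cubes.any (fun q => decide (q.2.1 = cy) && decide (q.2.2 = cz) && decide (xmin - 1 ≤ q.1) && decide (q.1 ≤ cx)) := by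
  apply any_ray cubes (fun i => (cx - i, cy, cz))
  rintro ⟨x, y, z⟩
  simp only [Bool.and_eq_true, decide_eq_true_eq, Prod.mk.injEq, and_assoc]
  constructor
  · rintro ⟨h1, h2, h3, h4⟩
    exact ⟨cx - x, by omega, by omega, by omega, h1, h2⟩
  · rintro ⟨i, h1, h2, h3, h4, h5⟩
    exact ⟨h4, h5, by omega, by omega⟩

theorem leg3 (cubes : List (Int × Int × Int)) (cx cy cz ymax : Int) :
    (PySem.List.pyRange 0 (ymax - cy + 2) 1).any (fun i => cubes.contains (cx, cy + i, cz)) = cubes.any (fun q => decide (q.1 = cx) && decide (q.2.2 = cz) && decide (cy ≤ q.2.1) && decide (q.2.1 ≤ ymax + 1)) := by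
  apply any_ray cubes (fun i => (cx, cy + i, cz))
  rintro ⟨x, y, z⟩
  simp only [Bool.and_eq_true, decide_eq_true_eq, Prod.mk.injEq, and_assoc]
  constructor
  · rintro ⟨h1, h2, h3, h4⟩
    exact ⟨y - cy, by omega, by omega, h1, by omega, h2⟩
  · rintro ⟨i, h1, h2, h3, h4, h5⟩
    exact ⟨h3, h5, by omega, by omega⟩

theorem leg4 (cubes : List (Int × Int × Int)) (cx cy cz ymin : Int) :
    (PySem.List.pyRange 0 (cy - ymin + 2) 1).any (fun i => cubes.contains (cx, cy - i, cz)) = cubes.any (fun q => decide (q.1 = cx) && decide (q.2.2 = cz) && decide (ymin - 1 ≤ q.2.1) && decide (q.2.1 ≤ cy)) := by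
  apply any_ray cubes (fun i => (cx, cy - i, cz))
  rintro ⟨x, y, z⟩
  simp only [Bool.and_eq_true, decide_eq_true_eq, Prod.mk.injEq, and_assoc]
  constructor
  · rintro ⟨h1, h2, h3, h4⟩
    exact ⟨cy - y, by omega, by omega, h1, by omega, h2⟩
  · rintro ⟨i, h1, h2, h3, h4, h5⟩
    exact ⟨h3, h5, by omega, by omega⟩

theorem leg5 (cubes : List (Int × Int × Int)) (cx cy cz zmax : Int) :
    (PySem.List.pyRange 0 (zmax - cz + 2) 1).any (fun i => cubes.contains (cx, cy, cz + i)) = cubes.any (fun q => decide (q.1 = cx) && decide (q.2.1 = cy) && decide (cz ≤ q.2.2) && decide (q.2.2 ≤ zmax + 1)) := by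
  apply any_ray cubes (fun i => (cx, cy, cz + i))
  rintro ⟨x, y, z⟩
  simp only [Bool.and_eq_true, decide_eq_true_eq, Prod.mk.injEq, and_assoc]
  constructor
  · rintro ⟨h1, h2, h3, h4⟩
    exact ⟨z - cz, by omega, by omega, h1, h2, by omega⟩
  · rintro ⟨i, h1, h2, h3, h4, h5⟩
    exact ⟨h3, h4, by omega, by omega⟩

theorem leg6 (cubes : List (Int × Int × Int)) (cx cy cz zmin : Int) :
    (PySem.List.pyRange 0 (cz - zmin + 2) 1).any (fun i => cubes.contains (cx, cy, cz - i)) = cubes.any (fun q => decide (q.1 = cx) && decide (q.2.1 = cy) && decide (zmin - 1 ≤ q.2.2) && decide (q.2.2 ≤ cz)) := by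
  apply any_ray cubes (fun i => (cx, cy, cz - i))
  rintro ⟨x, y, z⟩
  simp only [Bool.and_eq_true, decide_eq_true_eq, Prod.mk.injEq, and_assoc]
  constructor
  · rintro ⟨h1, h2, h3, h4⟩
    exact ⟨cz - z, by omega, by omega, h1, h2, by omega⟩
  · rintro ⟨i, h1, h2, h3, h4, h5⟩
    exact ⟨h3, h4, by omega, by omega⟩

-- ===== VERDICT (by name: the statement is the Claim_ definition above) =====
theorem is_hole_2_spec : Claim_equal_is_hole_2 := by
  intro c cubes xmin xmax ymin ymax zmin zmax _
  obtain ⟨cx, cy, cz⟩ := c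
  unfold Spec_is_hole_2 is_hole_2 is_hole_2_alt
  simp only []
  rw [foldl_altStep]
  simp only [Bool.false_or]
  rw [leg1, leg2, leg3, leg4, leg5, leg6]
  generalize cubes.any _ = e1
  generalize cubes.any _ = e2
  generalize cubes.any _ = e3
  generalize cubes.any _ = e4
  generalize cubes.any _ = e5
  generalize cubes.any _ = e6
  cases e1 <;> cases e2 <;> cases e3 <;> cases e4 <;> cases e5 <;> cases e6 <;> simp
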